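-- pv_equiv track=rewrite | github.com/shinPark43/LeetCode | Solutions/Binary Search/Find the Distance Between Two Arrays.py | findClosestDiff
-- ===== SOURCE A (Python) =====
-- def findClosestDiff(element, arr, d):
--     l, h = 0, len(arr) - 1
--
--     while l <= h:
--         mid = (l + h) // 2
--
--         if abs(element - arr[mid]) <= d:
--             return False
--         elif arr[mid] < element:
--             l = mid + 1
--         elif arr[mid] > element:
--             h = mid - 1
--     return True
-- ===== SOURCE B (Python) =====
-- def findClosestDiff(element, arr, d):
--     def helper(l, h):
--         if l > h:
--             return True
--         mid = (l + h) // 2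
--         if abs(element - arr[mid]) <= d:
--             return False
--         if arr[mid] < element:
--             return helper(mid + 1, h)
--         return helper(l, mid - 1)
--     return helper(0, len(arr) - 1)
-- ===== Notes on version B (the rewrite author's own statement) =====
-- stated objective: alternative
-- what changed: The iterative while-loop binary search is re-decomposed as a recursive helper(l, h); the final 'arr[mid] > element' guard becomes a plain else branch, so the degenerate equal-but-not-within case (possible only when d < 0) recurses left instead of looping forever.
-- outside the precondition, e.g. on findClosestDiff(1, [0, 1], -1): A does not finish within the time limit, B returns True; on findClosestDiff(1, [2, 1], -1): A returns True, B returns True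
import Mathlib
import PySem

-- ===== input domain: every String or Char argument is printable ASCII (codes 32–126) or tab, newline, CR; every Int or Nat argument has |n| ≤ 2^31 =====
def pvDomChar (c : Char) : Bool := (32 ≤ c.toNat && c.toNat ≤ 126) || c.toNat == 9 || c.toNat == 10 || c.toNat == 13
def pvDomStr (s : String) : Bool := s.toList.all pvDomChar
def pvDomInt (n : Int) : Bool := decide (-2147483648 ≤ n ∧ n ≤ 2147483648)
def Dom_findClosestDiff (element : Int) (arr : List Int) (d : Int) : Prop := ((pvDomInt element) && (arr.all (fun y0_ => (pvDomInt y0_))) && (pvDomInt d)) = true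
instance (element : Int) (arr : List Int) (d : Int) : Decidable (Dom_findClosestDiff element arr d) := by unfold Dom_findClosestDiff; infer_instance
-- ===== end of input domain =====

-- B re-decomposes A's iterative binary search as a recursive helper (same probe path on all
-- admitted inputs); alternative decomposition, no speed claim.

-- ===== PORT A =====
-- A's while-loop as fuel-indexed tail recursion over the same (l, h) state; the fuel only
-- models the loop's possible divergence (when d < 0 and arr[mid] == element, no branch fires
-- and the state repeats), which Pre_ excludes.
def findClosestDiffLoop (element : Int) (arr : List Int) (d : Int) : Nat → Int → Int → Bool
  | 0, _, _ => true
  | n + 1, l, h =>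
    if l ≤ h then
      let mid := PySem.Int.floordiv (l + h) 2
      if |element - PySem.List.pyGetD arr mid 0| ≤ d then false
      else if PySem.List.pyGetD arr mid 0 < element then
        findClosestDiffLoop element arr d n (mid + 1) h
      else if PySem.List.pyGetD arr mid 0 > element then
        findClosestDiffLoop element arr d n l (mid - 1)
      else
        findClosestDiffLoop element arr d n l h   -- loop body fires no branch: state unchanged
    else true

def findClosestDiff (element : Int) (arr : List Int) (d : Int) : Bool :=
  findClosestDiffLoop element arr d (arr.length + 1) 0 ((arr.length : Int) - 1)

-- ===== PORT B =====
def fcdHelper (element : Int) (arr : List Int) (d : Int) (l h : Int) : Bool :=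
  if l > h then true
  else
    let mid := PySem.Int.floordiv (l + h) 2
    if |element - PySem.List.pyGetD arr mid 0| ≤ d then false
    else if PySem.List.pyGetD arr mid 0 < element then fcdHelper element arr d (mid + 1) h
    else fcdHelper element arr d l (mid - 1)
  termination_by (h - l + 1).toNat
  decreasing_by
  · have := PySem.Int.floordiv_two_mid_bounds (lo := l) (hi := h) (by omega)
    omega
  · have := PySem.Int.floordiv_two_mid_bounds (lo := l) (hi := h) (by omega)
    omega

def findClosestDiff_alt (element : Int) (arr : List Int) (d : Int) : Bool :=
  fcdHelper element arr d 0 ((arr.length : Int) - 1)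

-- ===== PRECONDITION & SPEC =====
-- Pre_ excludes inputs with d < 0 and element ∈ arr: there A's loop either diverges (when the
-- search probes an index holding element) or happens to return True without probing it; this
-- divergence is an artefact A's loop shape, and B always returns True on that region.
def Pre_findClosestDiff (element : Int) (arr : List Int) (d : Int) : Prop :=
  0 ≤ d ∨ element ∉ arr
instance (element : Int) (arr : List Int) (d : Int) : Decidable (Pre_findClosestDiff element arr d) := by unfold Pre_findClosestDiff; infer_instance

def pvWitness_findClosestDiff : Int × List Int × Int := (3, [1, 3, 5], 1)

def Spec_findClosestDiff (element : Int) (arr : List Int) (d : Int) (out : Bool) : Prop := out = findClosestDiff_alt element arr d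
instance (element : Int) (arr : List Int) (d : Int) (out : Bool) : Decidable (Spec_findClosestDiff element arr d out) := by unfold Spec_findClosestDiff; infer_instance

-- ===== CLAIM (what is proved, stated in full; the proofs are below) =====
def Claim_equal_findClosestDiff : Prop := ∀ (element : Int) (arr : List Int) (d : Int), Dom_findClosestDiff element arr d → Pre_findClosestDiff element arr d → Spec_findClosestDiff element arr d (findClosestDiff element arr d)

-- ===== LEMMAS AND PROOFS =====
lemma loop_eq_helper (element d : Int) (arr : List Int)
    (hp : 0 ≤ d ∨ element ∉ arr) :
    ∀ (n : Nat) (l h : Int), 0 ≤ l → h < (arr.length : Int) → (h - l + 1).toNat < n →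
      findClosestDiffLoop element arr d n l h = fcdHelper element arr d l h := by
  intro n
  induction n with
  | zero => intro l h _ _ hfuel; omega
  | succ n ih =>
    intro l h hl hh hfuel
    rw [fcdHelper]
    simp only [findClosestDiffLoop]
    by_cases hlh : l ≤ h
    · have hmid := PySem.Int.floordiv_two_mid_bounds (lo := l) (hi := h) hlh
      set mid := PySem.Int.floordiv (l + h) 2 with hmiddef
      simp only [hlh, if_pos, if_neg (show ¬ l > h by omega)]
      by_cases hd : |element - PySem.List.pyGetD arr mid 0| ≤ d
      · simp [hd]
      · have hne : PySem.List.pyGetD arr mid 0 ≠ element := by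
          intro heq
          rcases hp with hp | hp
          · exact hd (by rw [heq]; simpa using hp)
          · exact hp (heq ▸ PySem.List.pyGetD_mem arr 0 (by constructor <;> omega))
        simp only [hd, if_false]
        by_cases hlt : PySem.List.pyGetD arr mid 0 < element
        · simp only [hlt, if_pos]
          exact ih (mid + 1) h (by omega) hh (by omega)
        · have hgt : PySem.List.pyGetD arr mid 0 > element := by
            rcases lt_trichotomy (PySem.List.pyGetD arr mid 0) element with h1 | h1 | h1
            · exact absurd h1 hlt
            · exact absurd h1 hne
            · exact h1
          simp only [hlt, hgt, if_pos, if_false]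
          exact ih l (mid - 1) hl (by omega) (by omega)
    · simp [hlh, show l > h by omega]

-- ===== VERDICT (by name: the statement is the Claim_ definition above) =====
theorem findClosestDiff_spec : Claim_equal_findClosestDiff := by
  intro element arr d _ hpre
  unfold Spec_findClosestDiff findClosestDiff findClosestDiff_alt
  exact loop_eq_helper element d arr hpre (arr.length + 1) 0 ((arr.length : Int) - 1)
    (by omega) (by omega) (by omega)
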